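-- pv_equiv track=rewrite | github.com/Odin63/amscams | pythonv2/lib/MeteorTests.py | find_min_max_dist
-- ===== SOURCE A (Python) =====
-- def max_xy(x,y,w,h,max_x,max_y,min_x,min_y):
--
--    if x + w > max_x:
--       max_x = x + w
--    if y + h > max_y:
--       max_y = y + h
--    if x < min_x:
--       min_x = x
--    if y < min_y:
--       min_y = y
--    return(max_x,max_y,min_x,min_y)
--
-- def find_min_max_dist(hist):
--    max_x = 0
--    max_y = 0
--    min_x = 10000
--    min_y = 10000
--    for fn,x,y,w,h,mx,my in hist:
--       max_x, max_y,min_x,min_y = max_xy(x,y,w,h,max_x,max_y,min_x,min_y)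
--
--    return(max_x,max_y,min_x,min_y)
-- ===== SOURCE B (Python) =====
-- def find_min_max_dist(hist):
--    max_x = max([0] + [x + w for fn, x, y, w, h, mx, my in hist])
--    max_y = max([0] + [y + h for fn, x, y, w, h, mx, my in hist])
--    min_x = min([10000] + [x for fn, x, y, w, h, mx, my in hist])
--    min_y = min([10000] + [y for fn, x, y, w, h, mx, my in hist])
--    return (max_x, max_y, min_x, min_y)
-- ===== Notes on version B (the rewrite author's own statement) =====
-- stated objective: idiomatic
-- what changed: Replaced the single fused loop with the max_xy helper by four independent builtin max/min reductions over per-field comprehensions, seeds folded into the lists.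
import Mathlib
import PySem

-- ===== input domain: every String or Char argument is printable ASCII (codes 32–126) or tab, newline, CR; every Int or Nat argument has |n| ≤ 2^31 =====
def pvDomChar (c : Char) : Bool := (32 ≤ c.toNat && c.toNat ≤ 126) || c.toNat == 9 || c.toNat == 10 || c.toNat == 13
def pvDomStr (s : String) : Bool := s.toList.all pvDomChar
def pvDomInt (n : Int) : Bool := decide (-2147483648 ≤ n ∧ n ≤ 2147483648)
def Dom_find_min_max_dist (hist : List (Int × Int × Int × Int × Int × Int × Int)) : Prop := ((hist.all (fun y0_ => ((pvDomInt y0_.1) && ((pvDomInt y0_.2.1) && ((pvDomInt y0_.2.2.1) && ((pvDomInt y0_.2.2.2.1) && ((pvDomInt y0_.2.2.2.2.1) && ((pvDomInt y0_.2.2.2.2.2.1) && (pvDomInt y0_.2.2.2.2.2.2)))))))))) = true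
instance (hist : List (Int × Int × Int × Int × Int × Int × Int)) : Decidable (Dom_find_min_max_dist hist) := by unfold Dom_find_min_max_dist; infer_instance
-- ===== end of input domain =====

-- B replaces A's single fused loop + max_xy helper by four independent builtin
-- max/min reductions over per-field lists (idiomatic; same O(n) cost).

-- ===== PORT A =====
def max_xy (x y w h max_x max_y min_x min_y : Int) : Int × Int × Int × Int :=
  let max_x := if x + w > max_x then x + w else max_x
  let max_y := if y + h > max_y then y + h else max_y
  let min_x := if x < min_x then x else min_x
  let min_y := if y < min_y then y else min_y
  (max_x, max_y, min_x, min_y)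

def find_min_max_dist (hist : List (Int × Int × Int × Int × Int × Int × Int)) : Int × Int × Int × Int :=
  hist.foldl
    (fun s t =>
      let (_fn, x, y, w, h, _mx, _my) := t
      let (max_x, max_y, min_x, min_y) := s
      max_xy x y w h max_x max_y min_x min_y)
    (0, 0, 10000, 10000)

-- ===== PORT B =====
def find_min_max_dist_alt (hist : List (Int × Int × Int × Int × Int × Int × Int)) : Int × Int × Int × Int :=
  let max_x := (0 :: hist.map (fun t => t.2.1 + t.2.2.2.1)).foldl max 0
  let max_y := (0 :: hist.map (fun t => t.2.2.1 + t.2.2.2.2.1)).foldl max 0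
  let min_x := (10000 :: hist.map (fun t => t.2.1)).foldl min 10000
  let min_y := (10000 :: hist.map (fun t => t.2.2.1)).foldl min 10000
  (max_x, max_y, min_x, min_y)

-- ===== PRECONDITION & SPEC =====
def Spec_find_min_max_dist (hist : List (Int × Int × Int × Int × Int × Int × Int)) (out : Int × Int × Int × Int) : Prop := out = find_min_max_dist_alt hist
instance (hist : List (Int × Int × Int × Int × Int × Int × Int)) (out : Int × Int × Int × Int) : Decidable (Spec_find_min_max_dist hist out) := by unfold Spec_find_min_max_dist; infer_instance

-- ===== CLAIM (what is proved, stated in full; the proofs are below) =====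
def Claim_equal_find_min_max_dist : Prop := ∀ (hist : List (Int × Int × Int × Int × Int × Int × Int)), Dom_find_min_max_dist hist → Spec_find_min_max_dist hist (find_min_max_dist hist)

-- ===== LEMMAS AND PROOFS =====

-- A's fused fold computes the four independent reductions, for every starting accumulator.
lemma fused_eq_four (hist : List (Int × Int × Int × Int × Int × Int × Int)) :
    ∀ a b c d : Int,
      hist.foldl
        (fun s t =>
          let (_fn, x, y, w, h, _mx, _my) := t
          let (max_x, max_y, min_x, min_y) := s
          max_xy x y w h max_x max_y min_x min_y)
        (a, b, c, d)
      = ((hist.map (fun t => t.2.1 + t.2.2.2.1)).foldl max a,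
         (hist.map (fun t => t.2.2.1 + t.2.2.2.2.1)).foldl max b,
         (hist.map (fun t => t.2.1)).foldl min c,
         (hist.map (fun t => t.2.2.1)).foldl min d) := by
  induction hist with
  | nil => intro a b c d; rfl
  | cons t ts ih =>
      intro a b c d
      obtain ⟨fn, x, y, w, h, mx, my⟩ := t
      simp only [List.foldl_cons, List.map_cons]
      rw [ih]
      simp only [max_xy]
      congr 1
      · split_ifs with hx <;> [rw [max_eq_right (by omega)]; rw [max_eq_left (by omega)]]
      congr 1
      · split_ifs with hy <;> [rw [max_eq_right (by omega)]; rw [max_eq_left (by omega)]]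
      congr 1
      · split_ifs with hx <;> [rw [min_eq_right (by omega)]; rw [min_eq_left (by omega)]]
      · split_ifs with hy <;> [rw [min_eq_right (by omega)]; rw [min_eq_left (by omega)]]

-- ===== VERDICT (by name: the statement is the Claim_ definition above) =====
theorem find_min_max_dist_spec : Claim_equal_find_min_max_dist := by
  intro hist _
  unfold Spec_find_min_max_dist find_min_max_dist find_min_max_dist_alt
  rw [fused_eq_four]
  simp [max_self, min_self]
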